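-- pv_equiv track=rewrite | github.com/vschs007/scrapcodes | testset.py | calc_pending
-- ===== SOURCE A (Python) =====
-- def calc_pending(ord, shifts):
--     n = len(ord)
--     res = []
--     total_time = 0  # Track cumulative time to avoid array operations
--
--     for shift in shifts:
--         total_time += shift
--         # Calculate how many complete sets of orders can be processed
--         complete_sets = total_time // sum(ord)
--         remaining_time = total_time % sum(ord)
--
--         # Find number of pending orders
--         processed = 0
--         curr_time = remaining_time
--
--         for i in range(n):
--             if curr_time >= ord[i]:
--                 curr_time -= ord[i]
--                 processed += 1
--             else:
--                 break
--
--         pending = n - processed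
--         res.append(pending)
--
--     return res
-- ===== SOURCE B (Python) =====
-- def calc_pending(ord, shifts):
--     # Precompute total once and the running maxima of the prefix sums; per shift
--     # a binary search on that nondecreasing array replaces the inner simulation.
--     n = len(ord)
--     total = sum(ord)
--     maxes = []  # maxes[k] = max prefix sum over the first k+1 orders (nondecreasing)
--     acc = 0
--     hi = None
--     for x in ord:
--         acc += x
--         if hi is None or acc > hi:
--             hi = acc
--         maxes.append(hi)
--     res = []
--     t = 0
--     for s in shifts:
--         t += s
--         r = t % total
--         # bisect_right(maxes, r) by hand (no imports in this module)
--         lo, up = 0, n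
--         while lo < up:
--             mid = (lo + up) // 2
--             if r < maxes[mid]:
--                 up = mid
--             else:
--                 lo = mid + 1
--         res.append(n - lo)
--     return res
-- ===== Notes on version B (the rewrite author's own statement) =====
-- stated objective: faster
-- what changed: B precomputes the total and the running maxima of the prefix sums once, then answers each shift with a hand-written binary search on that nondecreasing array instead of re-summing ord and re-simulating the greedy inner loop per shift.
import Mathlib
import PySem

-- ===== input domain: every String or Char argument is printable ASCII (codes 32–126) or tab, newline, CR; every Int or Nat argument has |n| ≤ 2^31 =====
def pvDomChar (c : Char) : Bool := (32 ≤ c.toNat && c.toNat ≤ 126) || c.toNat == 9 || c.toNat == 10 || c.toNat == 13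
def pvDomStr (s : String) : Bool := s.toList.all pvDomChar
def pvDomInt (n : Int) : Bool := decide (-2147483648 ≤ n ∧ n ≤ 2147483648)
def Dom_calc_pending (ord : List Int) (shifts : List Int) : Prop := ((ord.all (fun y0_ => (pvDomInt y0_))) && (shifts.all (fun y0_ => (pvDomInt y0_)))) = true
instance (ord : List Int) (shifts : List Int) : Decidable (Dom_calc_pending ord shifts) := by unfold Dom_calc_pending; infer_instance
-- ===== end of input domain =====

-- B replaces A's per-shift re-summation and greedy simulation by a one-time prefix-maximum
-- precomputation plus a binary search per shift (objective: faster, asymptotically).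

-- ===== PORT A =====
-- the inner 'for i in range(n): if curr_time >= ord[i]: … else: break' loop,
-- as structural recursion over ord carrying curr_time; returns 'processed'
def calcA_loop : List Int → Int → Nat
  | [], _ => 0
  | x :: xs, curr => if x ≤ curr then calcA_loop xs (curr - x) + 1 else 0

def calc_pending (ord : List Int) (shifts : List Int) : List Int :=
  let n := ord.length
  (shifts.foldl (fun (st : Int × List Int) shift =>
      let total_time := st.1 + shift
      let _complete_sets := PySem.Int.floordiv total_time ord.sum  -- computed by A, unused
      let remaining_time := PySem.Int.mod total_time ord.sum
      let processed := calcA_loop ord remaining_time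
      let pending := (n : Int) - (processed : Int)
      (total_time, st.2 ++ [pending])) (0, [])).2

-- ===== PORT B =====
-- Source B's first loop: running maxima of the prefix sums (state: acc, hi as in Source B)
def rmaxB : List Int → Int → Option Int → List Int
  | [], _, _ => []
  | x :: xs, acc, hi =>
    let acc' := acc + x
    let hi' := match hi with
      | none => acc'
      | some h => if h < acc' then acc' else h
    hi' :: rmaxB xs acc' (some hi')

-- Source B's hand-written bisect_right while-loop
-- mid = (lo + up) // 2 is written inline at its three use sites
def bsearchB (m : List Int) (r : Int) (lo up : Nat) : Nat :=
  if _h : lo < up then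
    if r < m.getD ((lo + up) / 2) 0 then bsearchB m r lo ((lo + up) / 2)
    else bsearchB m r ((lo + up) / 2 + 1) up
  else lo
termination_by up - lo
decreasing_by all_goals omega

def calc_pending_alt (ord : List Int) (shifts : List Int) : List Int :=
  let n := ord.length
  let total := ord.sum
  let maxes := rmaxB ord 0 none
  (shifts.foldl (fun (st : Int × List Int) s =>
      let t := st.1 + s
      let r := PySem.Int.mod t total
      let lo := bsearchB maxes r 0 n
      (t, st.2 ++ [(n : Int) - (lo : Int)])) (0, [])).2

-- ===== PRECONDITION & SPEC =====
-- Pre_ excludes exactly the inputs where a shift is processed with sum(ord) = 0: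
-- there both A and B raise ZeroDivisionError (with shifts = [] no division happens and both return []).
def Pre_calc_pending (ord : List Int) (shifts : List Int) : Prop := shifts = [] ∨ ord.sum ≠ 0
instance (ord : List Int) (shifts : List Int) : Decidable (Pre_calc_pending ord shifts) := by unfold Pre_calc_pending; infer_instance
def pvWitness_calc_pending : List Int × List Int := ([1, 2, 3], [3, 4, 10, 1])

def Spec_calc_pending (ord : List Int) (shifts : List Int) (out : List Int) : Prop := out = calc_pending_alt ord shifts
instance (ord : List Int) (shifts : List Int) (out : List Int) : Decidable (Spec_calc_pending ord shifts out) := by unfold Spec_calc_pending; infer_instance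

-- ===== CLAIM (what is proved, stated in full; the proofs are below) =====
def Claim_equal_calc_pending : Prop := ∀ (ord : List Int) (shifts : List Int), Dom_calc_pending ord shifts → Pre_calc_pending ord shifts → Spec_calc_pending ord shifts (calc_pending ord shifts)

-- ===== LEMMAS AND PROOFS =====

-- every element of rmaxB xs acc (some v) is ≥ v
theorem rmaxB_ge {xs : List Int} {acc v x : Int} (hx : x ∈ rmaxB xs acc (some v)) : v ≤ x := by
  induction xs generalizing acc v with
  | nil => simp [rmaxB] at hx
  | cons a tl ih =>
    simp only [rmaxB, List.mem_cons] at hx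
    rcases hx with h | h
    · subst h; split <;> omega
    · have := ih h; split_ifs at this <;> omega

theorem rmaxB_length (xs : List Int) (acc : Int) (hi : Option Int) :
    (rmaxB xs acc hi).length = xs.length := by
  induction xs generalizing acc hi with
  | nil => rfl
  | cons a tl ih => simp [rmaxB, ih]

-- rmaxB output is nondecreasing
theorem rmaxB_pairwise (xs : List Int) (acc : Int) (hi : Option Int) :
    List.Pairwise (· ≤ ·) (rmaxB xs acc hi) := by
  induction xs generalizing acc hi with
  | nil => simp [rmaxB]
  | cons a tl ih =>
    simp only [rmaxB]
    exact List.pairwise_cons.mpr ⟨fun x hx => rmaxB_ge hx, ih _ _⟩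

-- the greedy processed-count of A equals the count of running maxima ≤ r
theorem greedy_eq_countP (xs : List Int) (r : Int) :
    ∀ (acc : Int) (hi : Option Int), (∀ v, hi = some v → v ≤ r) →
    (rmaxB xs acc hi).countP (fun x => decide (x ≤ r)) = calcA_loop xs (r - acc) := by
  induction xs with
  | nil => intro acc hi _; rfl
  | cons a tl ih =>
    intro acc hi hh
    cases hi with
    | none =>
      simp only [rmaxB, List.countP_cons, calcA_loop]
      by_cases hle : a ≤ r - acc
      · rw [if_pos hle, ih (acc + a) (some (acc + a)) (by intro v hv; injection hv with h; omega)]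
        rw [show r - acc - a = r - (acc + a) by ring]
        simp [show acc + a ≤ r by omega]
      · rw [if_neg hle]
        have h0 : (rmaxB tl (acc + a) (some (acc + a))).countP (fun x => decide (x ≤ r)) = 0 := by
          rw [List.countP_eq_zero]
          intro x hx
          have := rmaxB_ge hx
          simp only [decide_eq_true_eq]
          omega
        rw [h0]
        simp [show ¬ acc + a ≤ r by omega]
    | some v =>
      have hv := hh v rfl
      simp only [rmaxB, List.countP_cons, calcA_loop]
      by_cases hle : a ≤ r - acc
      · have h1 : (if v < acc + a then acc + a else v) ≤ r := by split <;> omega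
        rw [if_pos hle, ih (acc + a) (some _) (by intro w hw; injection hw with h; omega)]
        rw [show r - acc - a = r - (acc + a) by ring]
        simp [h1]
      · have h1 : r < (if v < acc + a then acc + a else v) := by split <;> omega
        rw [if_neg hle]
        have h0 : (rmaxB tl (acc + a) (some (if v < acc + a then acc + a else v))).countP
            (fun x => decide (x ≤ r)) = 0 := by
          rw [List.countP_eq_zero]
          intro x hx
          have := rmaxB_ge hx
          simp only [decide_eq_true_eq]
          omega
        rw [h0]
        simp [show ¬ (if v < acc + a then acc + a else v) ≤ r by omega]

-- hand-written bisect_right returns the threshold index on a nondecreasing list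
theorem bsearchB_spec (m : List Int) (r : Int)
    (hs : ∀ i j (_ : i < m.length) (hj : j < m.length), i ≤ j → m[i]'(by omega) ≤ m[j]) :
    ∀ fuel lo up, up - lo ≤ fuel → lo ≤ up → up ≤ m.length →
    (∀ i (h : i < m.length), i < lo → m[i] ≤ r) →
    (∀ i (h : i < m.length), up ≤ i → r < m[i]) →
    lo ≤ bsearchB m r lo up ∧ bsearchB m r lo up ≤ up ∧
      (∀ i (h : i < m.length), m[i] ≤ r ↔ i < bsearchB m r lo up) := by
  intro fuel
  induction fuel with
  | zero =>
    intro lo up hf hlu hum hlow hhigh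
    have heq : lo = up := by omega
    subst heq
    rw [bsearchB, dif_neg (by omega)]
    refine ⟨le_refl _, le_refl _, fun i h => ⟨fun hle => ?_, fun hi => hlow i h hi⟩⟩
    by_contra hi
    exact absurd (hhigh i h (by omega)) (by omega)
  | succ f ih =>
    intro lo up hf hlu hum hlow hhigh
    rw [bsearchB]
    by_cases hlt : lo < up
    · rw [dif_pos hlt]
      have hmid : (lo + up) / 2 < up := by omega
      have hmidlo : lo ≤ (lo + up) / 2 := by omega
      have hmidm : (lo + up) / 2 < m.length := by omega
      rw [List.getD_eq_getElem m 0 hmidm]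
      by_cases hc : r < m[(lo + up) / 2]
      · rw [if_pos hc]
        have := ih lo ((lo + up) / 2) (by omega) (by omega) (by omega) hlow
          (fun i h hi => lt_of_lt_of_le hc (hs _ _ hmidm h hi))
        exact ⟨this.1, by omega, this.2.2⟩
      · rw [if_neg hc]
        have := ih ((lo + up) / 2 + 1) up (by omega) (by omega) hum
          (fun i h hi => le_trans (hs _ _ h hmidm (by omega)) (by omega)) hhigh
        exact ⟨by omega, this.2.1, this.2.2⟩
    · rw [dif_neg hlt]
      have heq : lo = up := by omega
      subst heq
      refine ⟨le_refl _, le_refl _, fun i h => ⟨fun hle => ?_, fun hi => hlow i h hi⟩⟩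
      by_contra hi
      exact absurd (hhigh i h (by omega)) (by omega)

-- countP of (· ≤ r) equals any index k with the threshold property
theorem countP_of_threshold (r : Int) :
    ∀ (m : List Int) (k : Nat), k ≤ m.length →
    (∀ i (h : i < m.length), m[i] ≤ r ↔ i < k) →
    m.countP (fun x => decide (x ≤ r)) = k := by
  intro m
  induction m with
  | nil =>
    intro k hk _
    simp only [List.length_nil, Nat.le_zero] at hk
    simp [hk]
  | cons a tl ih =>
    intro k hk hth
    have h0 := hth 0 (by simp)
    simp only [List.getElem_cons_zero] at h0
    by_cases hka : a ≤ r
    · have hkpos : 0 < k := h0.mp hka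
      have hrec := ih (k - 1) (by simp only [List.length_cons] at hk; omega)
        (fun i h => by
          have h2 := hth (i + 1) (by simp only [List.length_cons]; omega)
          simp only [List.getElem_cons_succ] at h2
          exact ⟨fun hle => by have := h2.mp hle; omega,
                 fun hi => h2.mpr (by omega)⟩)
      rw [List.countP_cons, hrec]
      simp only [decide_eq_true_eq, hka, if_pos]
      omega
    · have hk0 : k = 0 := by
        by_contra h
        exact hka (h0.mpr (by omega))
      subst hk0
      rw [List.countP_cons, ih 0 (by omega)
        (fun i h => by
          have h2 := hth (i + 1) (by simp only [List.length_cons]; omega)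
          simp only [List.getElem_cons_succ] at h2
          exact ⟨fun hle => absurd (h2.mp hle) (by omega), fun hi => absurd hi (by omega)⟩)]
      simp [hka]

-- per-shift equality: A's greedy count over ord = B's binary search over the running maxima
theorem count_eq (ord : List Int) (r : Int) :
    ((ord.length : Int) - (calcA_loop ord r : Int)) =
      ((ord.length : Int) - (bsearchB (rmaxB ord 0 none) r 0 ord.length : Int)) := by
  congr 1
  have hlen := rmaxB_length ord 0 none
  have hpw := rmaxB_pairwise ord 0 none
  have hs : ∀ i j (_ : i < (rmaxB ord 0 none).length) (hj : j < (rmaxB ord 0 none).length),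
      i ≤ j → (rmaxB ord 0 none)[i]'(by omega) ≤ (rmaxB ord 0 none)[j] := by
    intro i j hi hj hij
    rcases Nat.lt_or_ge i j with h | h
    · exact (List.pairwise_iff_getElem.mp hpw) i j hi hj h
    · have : i = j := by omega
      subst this; rfl
  have hb := bsearchB_spec (rmaxB ord 0 none) r hs (ord.length) 0 (ord.length)
    (by omega) (by omega) (by omega)
    (by intro i h hi; omega)
    (by intro i h hi; rw [hlen] at h; omega)
  have hc := countP_of_threshold r (rmaxB ord 0 none) (bsearchB (rmaxB ord 0 none) r 0 ord.length)
    (by rw [hlen]; exact hb.2.1) hb.2.2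
  have hg := greedy_eq_countP ord r 0 none (by intro v hv; cases hv)
  rw [show r - 0 = r by ring] at hg
  rw [← hg, hc]

-- the two folds over shifts agree step by step
theorem fold_eq (ord : List Int) (shifts : List Int) :
    ∀ (t : Int) (res : List Int),
    (shifts.foldl (fun (st : Int × List Int) shift =>
      let total_time := st.1 + shift
      let _cs := PySem.Int.floordiv total_time ord.sum
      let remaining := PySem.Int.mod total_time ord.sum
      (total_time, st.2 ++ [(ord.length : Int) - (calcA_loop ord remaining : Int)])) (t, res)).2 =
    (shifts.foldl (fun (st : Int × List Int) s =>
      let t' := st.1 + s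
      let r := PySem.Int.mod t' ord.sum
      (t', st.2 ++ [(ord.length : Int) - (bsearchB (rmaxB ord 0 none) r 0 ord.length : Int)])) (t, res)).2 := by
  induction shifts with
  | nil => intro t res; rfl
  | cons s tl ih =>
    intro t res
    simp only [List.foldl_cons]
    rw [count_eq ord (PySem.Int.mod (t + s) ord.sum)]
    exact ih (t + s) _

-- ===== VERDICT (by name: the statement is the Claim_ definition above) =====
theorem calc_pending_spec : Claim_equal_calc_pending := by
  intro ord shifts _ _
  unfold Spec_calc_pending calc_pending calc_pending_alt
  exact fold_eq ord shifts 0 []
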